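-- pv_equiv track=rewrite | github.com/lodyga/Django | codesite/core/scripts.py | format_sse
-- ===== SOURCE A (Python) =====
-- def format_sse(data, event=None):
--     data = (data or "").replace("\r", "")
--     lines = data.split("\n")
--     payload_lines = []
--     if event:
--         payload_lines.append(f"event: {event}")
--     for line in lines:
--         # No space after ":" to preserve leading spaces in data
--         payload_lines.append(f"data:{line}")
--     return "\n".join(payload_lines) + "\n\n"
-- ===== SOURCE B (Python) =====
-- def format_sse(data, event=None):
--     body = "data:" + (data or "").replace("\r", "").replace("\n", "\ndata:")
--     prefix = f"event: {event}\n" if event else ""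
--     return prefix + body + "\n\n"
-- ===== Notes on version B (the rewrite author's own statement) =====
-- stated objective: idiomatic
-- what changed: Drops the split-into-lines list, append loop and join: B builds the body with a single string substitution that inserts the data: prefix after every newline, and prepends a conditional event prefix string.
import Mathlib
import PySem

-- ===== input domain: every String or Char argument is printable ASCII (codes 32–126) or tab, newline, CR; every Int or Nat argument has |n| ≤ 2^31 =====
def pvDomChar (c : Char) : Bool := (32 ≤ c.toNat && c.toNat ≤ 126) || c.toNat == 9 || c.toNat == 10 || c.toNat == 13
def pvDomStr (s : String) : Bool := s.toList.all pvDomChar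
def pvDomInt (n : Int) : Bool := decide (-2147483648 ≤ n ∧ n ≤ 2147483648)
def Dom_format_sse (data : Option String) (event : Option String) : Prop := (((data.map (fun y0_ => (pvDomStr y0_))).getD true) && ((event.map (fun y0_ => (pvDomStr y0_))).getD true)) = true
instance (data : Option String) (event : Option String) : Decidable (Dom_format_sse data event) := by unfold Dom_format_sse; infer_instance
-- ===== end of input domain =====

-- B replaces A's split/loop/join line handling by a single str.replace that prefixes every line (idiomatic, same cost).

-- ===== PORT A =====
def format_sse (data : Option String) (event : Option String) : String :=
  let d := PySem.Str.replace (data.getD "") "\r" ""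
  let lines := (PySem.Str.split? d "\n").getD []   -- sep "\n" ≠ "", so split? is always `some`
  let payload_lines : List String :=
    match event with
    | some e => if e ≠ "" then ["event: " ++ e] else []
    | none => []
  let payload_lines := lines.foldl (fun acc line => acc ++ ["data:" ++ line]) payload_lines
  PySem.Str.join "\n" payload_lines ++ "\n\n"

-- ===== PORT B =====
def format_sse_alt (data : Option String) (event : Option String) : String :=
  let body := "data:" ++ PySem.Str.replace (PySem.Str.replace (data.getD "") "\r" "") "\n" "\ndata:"
  let pre : String :=
    match event with
    | some e => if e ≠ "" then "event: " ++ e ++ "\n" else ""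
    | none => ""
  pre ++ body ++ "\n\n"

-- ===== PRECONDITION & SPEC =====
def Spec_format_sse (data : Option String) (event : Option String) (out : String) : Prop := out = format_sse_alt data event
instance (data : Option String) (event : Option String) (out : String) : Decidable (Spec_format_sse data event out) := by unfold Spec_format_sse; infer_instance

-- ===== CLAIM (what is proved, stated in full; the proofs are below) =====
def Claim_equal_format_sse : Prop := ∀ (data : Option String) (event : Option String), Dom_format_sse data event → Spec_format_sse data event (format_sse data event)

-- ===== LEMMAS AND PROOFS =====

-- The fold in A just appends one mapped element per line.
theorem foldl_append_map {α β : Type} (f : α → β) :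
    ∀ (l : List α) (init : List β),
      l.foldl (fun acc x => acc ++ [f x]) init = init ++ l.map f := by
  intro l
  induction l with
  | nil => intro init; simp
  | cons x t ih => intro init; simp [List.foldl_cons, ih]

-- Chars.splitOn with a one-char separator is Mathlib's List.splitOn.
theorem chars_splitOn_go (o : Char) :
    ∀ (l : List Char) (fuel : Nat) (cur : List Char) (acc : List (List Char)),
      l.length ≤ fuel →
      PySem.Chars.splitOn.go [o] fuel l cur acc
        = acc.reverse ++ (List.splitOn o l).modifyHead (fun h => cur.reverse ++ h) := by
  intro l
  induction l with
  | nil =>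
    intro fuel cur acc _
    cases fuel <;> simp [PySem.Chars.splitOn.go, List.splitOn]
  | cons c t ih =>
    intro fuel cur acc hf
    cases fuel with
    | zero => simp at hf
    | succ f =>
      by_cases hc : c = o
      · subst hc
        have hp : List.isPrefixOf [c] (c :: t) = true := by
          simp [List.isPrefixOf]
        simp only [PySem.Chars.splitOn.go, hp, if_pos, List.drop, List.length]
        rw [ih f [] (cur.reverse :: acc) (by simpa using hf)]
        simp only [List.splitOn, List.splitOnP_cons, BEq.rfl, if_pos]
        cases h' : List.splitOnP (fun x => x == c) t <;> simp
      · have hp : List.isPrefixOf [o] (c :: t) = false := by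
          simp [List.isPrefixOf]
          exact fun h => hc h.symm
        simp only [PySem.Chars.splitOn.go, hp]
        rw [ih f (c :: cur) acc (by simpa using hf)]
        have hco : (c == o) = false := by simp [hc]
        simp [List.splitOn, List.splitOnP_cons, hco]
        obtain ⟨h, tl, hh⟩ := List.exists_cons_of_ne_nil (List.splitOnP_ne_nil (· == o) t)
        simp [hh, List.modifyHead]

theorem chars_splitOn_eq (o : Char) (cs : List Char) :
    PySem.Chars.splitOn cs [o] = List.splitOn o cs := by
  rw [PySem.Chars.splitOn.eq_1, chars_splitOn_go o cs (cs.length + 1) [] [] (by omega)]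
  obtain ⟨h, tl, hh⟩ := List.exists_cons_of_ne_nil (List.splitOnP_ne_nil (· == o) cs)
  simp [List.splitOn, hh, List.modifyHead]

-- join of a head-modified parts list
theorem join_cons_head (n : List Char) (c : Char) (h : List Char) (tl : List (List Char)) :
    PySem.Chars.join n ((c :: h) :: tl) = c :: PySem.Chars.join n (h :: tl) := by
  cases tl with
  | nil => simp [PySem.Chars.join_singleton]
  | cons q r => simp [PySem.Chars.join_cons_cons]

-- replace with a one-char pattern is the join of the split pieces.
theorem chars_replace_go (o : Char) (n : List Char) :
    ∀ (l : List Char) (fuel : Nat) (acc : List Char),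
      l.length ≤ fuel →
      PySem.Chars.replace.go [o] n fuel l acc
        = acc.reverse ++ PySem.Chars.join n (List.splitOn o l) := by
  intro l
  induction l with
  | nil =>
    intro fuel acc _
    cases fuel <;> simp [PySem.Chars.replace.go, List.splitOn, PySem.Chars.join_singleton]
  | cons c t ih =>
    intro fuel acc hf
    cases fuel with
    | zero => simp at hf
    | succ f =>
      by_cases hc : c = o
      · subst hc
        have hp : List.isPrefixOf [c] (c :: t) = true := by simp [List.isPrefixOf]
        simp only [PySem.Chars.replace.go, hp, if_pos]
        rw [show List.drop (List.length [c]) (c :: t) = t from rfl]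
        rw [ih f (n.reverse ++ acc) (by simpa using hf)]
        obtain ⟨h, tl, hh⟩ := List.exists_cons_of_ne_nil (List.splitOnP_ne_nil (· == c) t)
        simp [List.splitOn, List.splitOnP_cons, hh, PySem.Chars.join_cons_cons]
      · have hp : List.isPrefixOf [o] (c :: t) = false := by
          simp [List.isPrefixOf]
          exact fun h => hc h.symm
        simp only [PySem.Chars.replace.go, hp]
        rw [ih f (c :: acc) (by simpa using hf)]
        have hco : (c == o) = false := by simp [hc]
        simp only [List.splitOn, List.splitOnP_cons, hco, if_neg Bool.false_ne_true]
        obtain ⟨h, tl, hh⟩ := List.exists_cons_of_ne_nil (List.splitOnP_ne_nil (· == o) t)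
        simp [hh, List.modifyHead, join_cons_head]

theorem chars_replace_eq (o : Char) (n : List Char) (cs : List Char) :
    PySem.Chars.replace cs [o] n = PySem.Chars.join n (List.splitOn o cs) := by
  have : ([o] : List Char).isEmpty = false := rfl
  rw [PySem.Chars.replace]
  simp only [this, Bool.false_eq_true]
  exact chars_replace_go o n cs cs.length [] (le_refl _)

-- prefixing every piece with d, then joining with [o], equals d ++ join with (o :: d)
theorem join_map_prefix (o : Char) (d : List Char) :
    ∀ (P : List (List Char)), P ≠ [] →
      PySem.Chars.join [o] (P.map (fun l => d ++ l)) = d ++ PySem.Chars.join (o :: d) P := by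
  intro P
  induction P with
  | nil => intro h; exact absurd rfl h
  | cons p q ih =>
    intro _
    cases q with
    | nil => simp [PySem.Chars.join_singleton]
    | cons p2 r =>
      have hih := ih (by simp)
      simp only [List.map_cons] at hih ⊢
      rw [PySem.Chars.join_cons_cons, PySem.Chars.join_cons_cons, hih]
      simp

-- the central identity at the char-list level
theorem core (o : Char) (d : List Char) (cs : List Char) :
    PySem.Chars.join [o] ((PySem.Chars.splitOn cs [o]).map (fun l => d ++ l))
      = d ++ PySem.Chars.replace cs [o] (o :: d) := by
  rw [chars_splitOn_eq, chars_replace_eq]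
  exact join_map_prefix o d _ (List.splitOnP_ne_nil _ _)

theorem join_cons_of_ne_nil (sep x : List Char) (M : List (List Char)) (h : M ≠ []) :
    PySem.Chars.join sep (x :: M) = x ++ sep ++ PySem.Chars.join sep M := by
  cases M with
  | nil => exact absurd rfl h
  | cons q r => exact PySem.Chars.join_cons_cons sep x q r

-- ===== VERDICT (by name: the statement is the Claim_ definition above) =====
theorem format_sse_spec : Claim_equal_format_sse := by
  intro data event _
  unfold Spec_format_sse format_sse format_sse_alt
  have hs := PySem.Str.split?_map (PySem.Str.replace (data.getD "") "\r" "") "\n"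
  rw [show ("\n" : String).toList = ['\n'] from rfl] at hs
  rw [show PySem.Chars.split? (PySem.Str.replace (data.getD "") "\r" "").toList ['\n']
        = some (PySem.Chars.splitOn (PySem.Str.replace (data.getD "") "\r" "").toList ['\n']) from rfl] at hs
  cases hL : PySem.Str.split? (PySem.Str.replace (data.getD "") "\r" "") "\n" with
  | none => rw [hL] at hs; simp at hs
  | some L =>
    rw [hL] at hs
    simp only [Option.map_some, Option.some.injEq] at hs
    simp only []
    rw [hL]
    simp only [Option.getD_some]
    rw [foldl_append_map]
    have hmap : (L.map (fun l => ("data:" ++ l : String))).map String.toList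
        = (PySem.Chars.splitOn (PySem.Str.replace (data.getD "") "\r" "").toList ['\n']).map
            (fun l => "data:".toList ++ l) := by
      rw [← hs]
      simp [Function.comp_def, String.toList_append]
    have hcore := core '\n' "data:".toList (PySem.Str.replace (data.getD "") "\r" "").toList
    have hrep : (PySem.Str.replace (PySem.Str.replace (data.getD "") "\r" "") "\n" "\ndata:").toList
        = PySem.Chars.replace (PySem.Str.replace (data.getD "") "\r" "").toList ['\n'] ('\n' :: "data:".toList) := by
      rw [PySem.Str.toList_replace]; rfl
    cases event with
    | none =>
      simp only [List.nil_append]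
      rw [← String.toList_inj]
      simp only [String.toList_append, PySem.Str.join.eq_1, String.toList_ofList, hmap, hrep]
      rw [show ("\n" : String).toList = ['\n'] from rfl, hcore]
      simp
    | some e =>
      by_cases he : e = ""
      · subst he
        simp only [ne_eq, not_true_eq_false, if_false, List.nil_append]
        rw [← String.toList_inj]
        simp only [String.toList_append, PySem.Str.join.eq_1, String.toList_ofList, hmap, hrep]
        rw [show ("\n" : String).toList = ['\n'] from rfl, hcore]
        simp
      · have hMne2 : List.map (fun l => "data:".toList ++ l)
            (PySem.Chars.splitOn (PySem.Str.replace (data.getD "") "\r" "").toList ['\n']) ≠ [] := by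
          simp only [ne_eq, List.map_eq_nil_iff, chars_splitOn_eq, List.splitOn]
          exact List.splitOnP_ne_nil _ _
        simp only [ne_eq, he, not_false_eq_true, if_true, List.singleton_append]
        rw [← String.toList_inj]
        simp only [String.toList_append, PySem.Str.join.eq_1, String.toList_ofList, List.map_cons,
          hmap, hrep]
        rw [show ("\n" : String).toList = ['\n'] from rfl, join_cons_of_ne_nil _ _ _ hMne2, hcore]
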